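-- pv_equiv track=rewrite | github.com/yongsun-yoon/python-algorithms | programmers/17682.py | solution
-- ===== SOURCE A (Python) =====
-- def solution(dartResult):
--     bonuses = ['S', 'D', 'T']
--     answer = 0
--
--     pp, p = 0, 0
--     i = 0
--     while i < len(dartResult):
--         r = dartResult[i]
--
--         if r.isdigit():
--             if dartResult[i+1].isdigit():
--                 r = dartResult[i:i+2]
--                 i += 1
--             pp = p
--             p = int(r)
--
--         elif r in bonuses:
--             p = p ** (bonuses.index(r) + 1)
--             answer += p
--
--         else:
--             if r  == '*':
--                 answer += pp + p
--                 p *= 2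
--                 pp *= 2
--
--             else:
--                 answer -= p * 2
--                 p *= -1
--
--         i += 1
--
--     return answer
-- ===== SOURCE B (Python) =====
-- def solution(dartResult):
--     # tokenize: maximal digit runs are cut into numbers of at most two digits
--     # (left to right); every other character stands alone as a token
--     tokens, run = [], ''
--     for c in dartResult:
--         if c.isdigit():
--             run += c
--         else:
--             while run:
--                 tokens.append(int(run[:2]))
--                 run = run[2:]
--             tokens.append(c)
--     while run:
--         tokens.append(int(run[:2]))
--         run = run[2:]
--     # evaluate the token stream with a fold over (answer, pp, p)
--     answer = pp = p = 0
--     for t in tokens: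
--         if isinstance(t, int):
--             pp, p = p, t
--         elif t == 'S':
--             answer += p
--         elif t == 'D':
--             p = p ** 2
--             answer += p
--         elif t == 'T':
--             p = p ** 3
--             answer += p
--         elif t == '*':
--             answer += pp + p
--             pp, p = 2 * pp, 2 * p
--         else:
--             answer -= 2 * p
--             p = -p
--     return answer
-- ===== Notes on version B (the rewrite author's own statement) =====
-- stated objective: alternative
-- what changed: Replaces A's single-pass index-based character state machine (with in-loop digit lookahead and manual index stepping) by a two-phase tokenize-then-fold: a lexer first cuts the string into a token list (digit runs chunked into at-most-two-digit numbers, other characters standing alone), then one fold over the tokens computes the score.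
import Mathlib
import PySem

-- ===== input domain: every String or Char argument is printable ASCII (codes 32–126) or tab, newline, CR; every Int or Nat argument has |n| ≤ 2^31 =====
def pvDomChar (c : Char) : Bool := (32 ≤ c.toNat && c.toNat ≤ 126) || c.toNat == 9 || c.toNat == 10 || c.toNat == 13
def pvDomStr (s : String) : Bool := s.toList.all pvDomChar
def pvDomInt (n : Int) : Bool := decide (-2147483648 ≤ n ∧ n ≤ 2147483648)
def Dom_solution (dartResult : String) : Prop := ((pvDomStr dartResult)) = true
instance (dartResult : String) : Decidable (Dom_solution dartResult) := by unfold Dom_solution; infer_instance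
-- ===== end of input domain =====

-- B re-implements A as a two-pass tokenize-then-fold (token list instead of an
-- index-based character state machine with lookahead); same return value on all
-- strings on which A returns (Pre_ excludes exactly A's IndexError inputs).

-- ===== PORT A =====
-- A's while-loop over the index i, ported as the obvious recursion on the
-- remaining suffix of the character list (the loop only moves forward and only
-- looks at dartResult[i] and dartResult[i+1]).  Where A raises IndexError
-- (a digit whose lookahead dartResult[i+1] is out of range) the port returns the
-- accumulator instead; those inputs are excluded by Pre_solution.
def solutionLoop : List Char → Int → Int → Int → Int
  | [], answer, _, _ => answer
  | r :: rest, answer, pp, p =>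
    if r.isDigit then
      match rest with
      | r2 :: rest2 =>
        if r2.isDigit then
          -- r = dartResult[i:i+2]; i += 1;  pp = p; p = int(r)
          solutionLoop rest2 answer p (10 * ((r.toNat : Int) - 48) + ((r2.toNat : Int) - 48))
        else
          solutionLoop (r2 :: rest2) answer p ((r.toNat : Int) - 48)
      | [] => -- dartResult[i+1] raises IndexError in Python (outside Pre_)
        answer
    else if r = 'S' ∨ r = 'D' ∨ r = 'T' then
      -- p = p ** (bonuses.index(r) + 1); answer += p
      let p' := p ^ (if r = 'S' then 1 else if r = 'D' then 2 else 3)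
      solutionLoop rest (answer + p') pp p'
    else if r = '*' then
      -- answer += pp + p; p *= 2; pp *= 2
      solutionLoop rest (answer + pp + p) (pp * 2) (p * 2)
    else
      -- answer -= p * 2; p *= -1
      solutionLoop rest (answer - p * 2) pp (p * -1)
termination_by l _ _ _ => l.length
decreasing_by all_goals (simp [List.length_cons]; try omega)

def solution (dartResult : String) : Int :=
  solutionLoop dartResult.toList 0 0 0

-- ===== PORT B =====
inductive Tok where
  | num : Int → Tok
  | sym : Char → Tok
deriving DecidableEq, Repr

-- `while run: tokens.append(int(run[:2])); run = run[2:]`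
def chunkRun : List Char → List Tok
  | [] => []
  | [a] => [Tok.num ((a.toNat : Int) - 48)]
  | a :: b :: rest =>
      Tok.num (10 * ((a.toNat : Int) - 48) + ((b.toNat : Int) - 48)) :: chunkRun rest

-- the lexing loop of B: `run` is the pending digit buffer
def lexToks : List Char → List Char → List Tok
  | run, [] => chunkRun run
  | run, c :: cs =>
    if c.isDigit then lexToks (run ++ [c]) cs
    else chunkRun run ++ Tok.sym c :: lexToks [] cs

-- the evaluating fold of B over (answer, pp, p)
def evalToks : List Tok → Int → Int → Int → Int
  | [], answer, _, _ => answer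
  | Tok.num n :: ts, answer, _, p => evalToks ts answer p n
  | Tok.sym c :: ts, answer, pp, p =>
    if c = 'S' then evalToks ts (answer + p) pp p
    else if c = 'D' then evalToks ts (answer + p ^ 2) pp (p ^ 2)
    else if c = 'T' then evalToks ts (answer + p ^ 3) pp (p ^ 3)
    else if c = '*' then evalToks ts (answer + pp + p) (2 * pp) (2 * p)
    else evalToks ts (answer - 2 * p) pp (-p)

def solution_alt (dartResult : String) : Int :=
  evalToks (lexToks [] dartResult.toList) 0 0 0

-- ===== PRECONDITION & SPEC =====
-- Pre_ excludes exactly the inputs on which A raises IndexError: strings whose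
-- maximal trailing run of digits has odd length (the lookahead dartResult[i+1]
-- then falls off the end of the string).
def Pre_solution (dartResult : String) : Prop :=
  (dartResult.toList.reverse.takeWhile Char.isDigit).length % 2 = 0
instance (dartResult : String) : Decidable (Pre_solution dartResult) := by
  unfold Pre_solution; infer_instance

def pvWitness_solution : String := ("1S2D*3T")

def Spec_solution (dartResult : String) (out : Int) : Prop := out = solution_alt dartResult
instance (dartResult : String) (out : Int) : Decidable (Spec_solution dartResult out) := by unfold Spec_solution; infer_instance

-- ===== CLAIM (what is proved, stated in full; the proofs are below) =====
def Claim_equal_solution : Prop := ∀ (dartResult : String), Dom_solution dartResult → Pre_solution dartResult → Spec_solution dartResult (solution dartResult)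

-- ===== LEMMAS AND PROOFS =====

-- the (pp, p) state after the number tokens of a digit run
def numState : List Char → Int → Int → Int × Int
  | [], pp, p => (pp, p)
  | [a], _, p => (p, (a.toNat : Int) - 48)
  | a :: b :: rest, _, p => numState rest p (10 * ((a.toNat : Int) - 48) + ((b.toNat : Int) - 48))

theorem evalToks_chunk_append (run : List Char) (ts : List Tok) (a pp p : Int) :
    evalToks (chunkRun run ++ ts) a pp p =
      evalToks ts a (numState run pp p).1 (numState run pp p).2 := by
  induction run using chunkRun.induct generalizing pp p with
  | case1 => simp [chunkRun, numState]
  | case2 c => simp [chunkRun, numState, evalToks]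
  | case3 c d rest ih => simp [chunkRun, numState, evalToks, ih]

theorem loopA_digits (run : List Char) (hrun : run.all Char.isDigit)
    (c : Char) (hc : c.isDigit = false) (cs : List Char) (a pp p : Int) :
    solutionLoop (run ++ c :: cs) a pp p =
      solutionLoop (c :: cs) a (numState run pp p).1 (numState run pp p).2 := by
  induction run using chunkRun.induct generalizing pp p with
  | case1 => simp [numState]
  | case2 d =>
    simp only [List.all_cons, Bool.and_eq_true, List.all_nil] at hrun
    simp [numState, solutionLoop, hrun.1, hc]
  | case3 d e rest ih =>
    simp only [List.all_cons, Bool.and_eq_true] at hrun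
    simp [numState, solutionLoop, hrun.1, hrun.2.1, ih hrun.2.2]

theorem loopA_digits_nil (run : List Char) (hrun : run.all Char.isDigit)
    (heven : run.length % 2 = 0) (a pp p : Int) :
    solutionLoop run a pp p = a := by
  induction run using chunkRun.induct generalizing pp p with
  | case1 => simp [solutionLoop]
  | case2 d => simp at heven
  | case3 d e rest ih =>
    simp only [List.all_cons, Bool.and_eq_true] at hrun
    simp only [List.length_cons] at heven
    rw [solutionLoop]
    simp [hrun.1, hrun.2.1, ih hrun.2.2 (by omega)]

theorem evalToks_chunk_nil (run : List Char) (a pp p : Int)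
    (heven : run.length % 2 = 0) :
    evalToks (chunkRun run) a pp p = a := by
  induction run using chunkRun.induct generalizing pp p with
  | case1 => simp [chunkRun, evalToks]
  | case2 d => simp at heven
  | case3 d e rest ih =>
    simp only [List.length_cons] at heven
    simp [chunkRun, evalToks, ih _ _ (by omega)]

-- takeWhile ignores everything behind the first failing element
theorem takeWhile_append_not (p : Char → Bool) (l : List Char) (c : Char)
    (hc : p c = false) (m : List Char) :
    (l ++ c :: m).takeWhile p = l.takeWhile p := by
  induction l with
  | nil => simp [List.takeWhile, hc]
  | cons x xs ih =>
    by_cases hx : p x <;> simp [List.takeWhile, hx, ih]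

theorem etail_shift (run cs : List Char) (c : Char) (hc : c.isDigit = false) :
    ((run ++ c :: cs).reverse.takeWhile Char.isDigit).length % 2 =
      (cs.reverse.takeWhile Char.isDigit).length % 2 := by
  have : (run ++ c :: cs).reverse = cs.reverse ++ c :: run.reverse := by simp
  rw [this, takeWhile_append_not _ _ _ hc]

theorem main_lemma (cs : List Char) :
    ∀ (run : List Char) (a pp p : Int), run.all Char.isDigit →
    (((run ++ cs).reverse.takeWhile Char.isDigit).length % 2 = 0) →
    solutionLoop (run ++ cs) a pp p = evalToks (lexToks run cs) a pp p := by
  induction cs with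
  | nil =>
    intro run a pp p hrun he
    have hall : run.reverse.takeWhile Char.isDigit = run.reverse := by
      apply List.takeWhile_eq_self_iff.mpr
      intro x hx
      exact (List.all_eq_true.mp hrun) x (List.mem_reverse.mp hx)
    simp only [List.append_nil] at he
    rw [hall] at he
    simp only [List.length_reverse] at he
    rw [List.append_nil, lexToks, loopA_digits_nil run hrun he,
      evalToks_chunk_nil run a pp p he]
  | cons c cs ih =>
    intro run a pp p hrun he
    by_cases hc : c.isDigit
    · rw [lexToks]
      simp only [hc, if_true]
      have hassoc : run ++ c :: cs = (run ++ [c]) ++ cs := by simp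
      rw [hassoc] at he ⊢
      exact ih (run ++ [c]) a pp p (by simp [List.all_eq_true] at hrun ⊢; exact ⟨hrun, hc⟩) he
    · have hc' : c.isDigit = false := by simpa using hc
      have he' : ((cs.reverse.takeWhile Char.isDigit).length % 2 = 0) := by
        rw [← etail_shift run cs c hc']; exact he
      rw [lexToks]
      simp only [hc', if_false, Bool.false_eq_true]
      rw [loopA_digits run hrun c hc' cs a pp p,
        evalToks_chunk_append run _ a pp p]
      set pp' := (numState run pp p).1
      set p' := (numState run pp p).2
      have hecs : (([] ++ cs : List Char).reverse.takeWhile Char.isDigit).length % 2 = 0 := by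
        simpa using he'
      rw [solutionLoop.eq_def, evalToks.eq_def]
      by_cases hS : c = 'S'
      · simp only [hS]
        have : ¬ ('S'.isDigit = true) := by decide
        simp only [if_pos (by left; rfl : 'S' = 'S' ∨ 'S' = 'D' ∨ 'S' = 'T'), this, if_false, if_pos rfl]
        simpa [pow_one] using ih [] (a + p') pp' p' (by simp) hecs
      by_cases hD : c = 'D'
      · simp only [hD]
        have : ¬ ('D'.isDigit = true) := by decide
        simp only [if_pos (by right; left; rfl : 'D' = 'S' ∨ 'D' = 'D' ∨ 'D' = 'T'), this, if_false]
        simp only [if_neg (by decide : ¬ ('D' = 'S')), if_pos rfl]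
        exact ih [] (a + p' ^ 2) pp' (p' ^ 2) (by simp) hecs
      by_cases hT : c = 'T'
      · simp only [hT]
        have : ¬ ('T'.isDigit = true) := by decide
        simp only [if_pos (by right; right; rfl : 'T' = 'S' ∨ 'T' = 'D' ∨ 'T' = 'T'), this, if_false]
        simp only [if_neg (by decide : ¬ ('T' = 'S')), if_neg (by decide : ¬ ('T' = 'D')), if_pos rfl]
        exact ih [] (a + p' ^ 3) pp' (p' ^ 3) (by simp) hecs
      · have hnb : ¬ (c = 'S' ∨ c = 'D' ∨ c = 'T') := by tauto
        simp only [hc', Bool.false_eq_true, if_false, if_neg hnb, if_neg hS, if_neg hD, if_neg hT]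
        by_cases hst : c = '*'
        · simp only [hst, if_pos rfl]
          have := ih [] (a + pp' + p') (pp' * 2) (p' * 2) (by simp) hecs
          simpa [mul_comm] using this
        · simp only [if_neg hst]
          have := ih [] (a - p' * 2) pp' (p' * -1) (by simp) hecs
          simpa [mul_comm, neg_eq_iff_eq_neg] using this

-- ===== VERDICT (by name: the statement is the Claim_ definition above) =====
theorem solution_spec : Claim_equal_solution := by
  intro s _ hpre
  unfold Spec_solution solution solution_alt
  exact main_lemma s.toList [] 0 0 0 (by simp) (by simpa [Pre_solution] using hpre)
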